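-- pv_equiv track=rewrite | github.com/c0rv4x/logins-generator | launcher.py | extract_delimiters
-- ===== SOURCE A (Python) =====
-- import string
--
-- def extract_delimiters(fullname_format):
--     delimiters = []
--     delimiter_already = False
--
--     for i, letter in enumerate(fullname_format):
--         if letter not in string.ascii_lowercase:
--             if delimiter_already:
--                 delimiters[-1] = (delimiters[-1][0], delimiters[-1][1] + letter)
--             else:
--                 delimiter_already = True
--                 delimiters.append((i, letter))
--         else:
--             delimiter_already = False
--
--     return delimiters
-- ===== SOURCE B (Python) =====
-- def extract_delimiters(fullname_format):
--     s = fullname_format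
--     n = len(s)
--     out = []
--     i = 0
--     while i < n:
--         if 'a' <= s[i] <= 'z':
--             i += 1
--         else:
--             j = i + 1
--             while j < n and not ('a' <= s[j] <= 'z'):
--                 j += 1
--             out.append((i, s[i:j]))
--             i = j
--     return out
-- ===== Notes on version B (the rewrite author's own statement) =====
-- stated objective: alternative
-- what changed: Replaced the per-character state machine (a delimiter_already flag plus repeated rebuilding of the last tuple) with a two-pointer scan that finds each maximal non-lowercase run at once and emits it via one slice.
import Mathlib
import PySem

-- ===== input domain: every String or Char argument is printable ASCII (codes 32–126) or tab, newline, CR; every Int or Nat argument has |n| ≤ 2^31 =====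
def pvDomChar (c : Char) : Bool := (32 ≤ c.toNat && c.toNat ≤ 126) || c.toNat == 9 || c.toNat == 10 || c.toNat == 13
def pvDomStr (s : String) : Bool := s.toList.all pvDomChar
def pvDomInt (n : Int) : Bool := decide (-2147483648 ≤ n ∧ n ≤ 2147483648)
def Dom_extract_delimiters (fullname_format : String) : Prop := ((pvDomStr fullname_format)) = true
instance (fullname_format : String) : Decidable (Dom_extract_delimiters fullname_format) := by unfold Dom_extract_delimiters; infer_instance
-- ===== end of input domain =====

-- B replaces A's per-character flag state machine (which rebuilds the last tuple on every
-- delimiter character) by a two-pointer scan emitting each maximal non-lowercase run at once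
-- (objective: alternative, same asymptotic cost).

-- ===== PORT A =====
-- string.ascii_lowercase
def pvAsciiLowercase : List Char := "abcdefghijklmnopqrstuvwxyz".toList

-- one iteration of A's for-loop; state = (delimiters, delimiter_already)
def pvStepA (st : List (Int × String) × Bool) (p : Int × Char) : List (Int × String) × Bool :=
  if p.2 ∉ pvAsciiLowercase then
    if st.2 then
      match st.1.getLast? with
      | some last => (st.1.dropLast ++ [(last.1, last.2 ++ p.2.toString)], st.2)
      | none => (st.1, st.2)   -- unreachable: the flag is true only when delimiters is nonempty
    else (st.1 ++ [(p.1, p.2.toString)], true)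
  else (st.1, false)

def extract_delimiters (fullname_format : String) : List (Int × String) :=
  ((PySem.List.enumerate fullname_format.toList).foldl pvStepA ([], false)).1

-- ===== PORT B =====
-- 'a' <= ch <= 'z'
def pvIsLower (c : Char) : Bool := 'a' ≤ c && c ≤ 'z'

-- Source B's outer while loop over the remaining characters (i = index of the head character);
-- the inner while loop that advances j past non-lowercase characters is the takeWhile/dropWhile
-- pair, and the slice s[i:j] is String.ofList of the taken run.
def pvScanRuns : List Char → Int → List (Int × String)
  | [], _ => []
  | c :: cs, i =>
    if pvIsLower c then pvScanRuns cs (i + 1)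
    else
      (i, String.ofList (c :: cs.takeWhile (fun d => !pvIsLower d))) ::
        pvScanRuns (cs.dropWhile (fun d => !pvIsLower d))
          (i + 1 + ((cs.takeWhile (fun d => !pvIsLower d)).length : Int))
termination_by cs _ => cs.length
decreasing_by
  · simp
  · have := List.length_dropWhile_le (fun d => !pvIsLower d) cs
    simp; omega

def extract_delimiters_alt (fullname_format : String) : List (Int × String) :=
  pvScanRuns fullname_format.toList 0

-- ===== PRECONDITION & SPEC =====
def Spec_extract_delimiters (fullname_format : String) (out : List (Int × String)) : Prop := out = extract_delimiters_alt fullname_format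
instance (fullname_format : String) (out : List (Int × String)) : Decidable (Spec_extract_delimiters fullname_format out) := by unfold Spec_extract_delimiters; infer_instance

-- ===== CLAIM (what is proved, stated in full; the proofs are below) =====
def Claim_equal_extract_delimiters : Prop := ∀ (fullname_format : String), Dom_extract_delimiters fullname_format → Spec_extract_delimiters fullname_format (extract_delimiters fullname_format)

-- ===== LEMMAS AND PROOFS =====

lemma pv_char_eq_iff (c d : Char) : c = d ↔ c.toNat = d.toNat :=
  ⟨fun h => h ▸ rfl, fun h => Char.ext (UInt32.toNat_inj.mp h)⟩

lemma pv_isLower_iff (c : Char) : pvIsLower c = true ↔ (97 ≤ c.toNat ∧ c.toNat ≤ 122) := by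
  simp only [pvIsLower, Bool.and_eq_true, Char.le_def, UInt32.le_iff_toNat_le,
    decide_eq_true_eq]
  have ha : ('a' : Char).val.toNat = 97 := rfl
  have hz : ('z' : Char).val.toNat = 122 := rfl
  have hc : c.toNat = c.val.toNat := rfl
  omega

lemma pv_mem_lower (c : Char) : c ∈ pvAsciiLowercase ↔ pvIsLower c = true := by
  rw [pv_isLower_iff]
  simp only [pvAsciiLowercase,
    show "abcdefghijklmnopqrstuvwxyz".toList = ['a','b','c','d','e','f','g','h','i','j','k','l','m','n','o','p','q','r','s','t','u','v','w','x','y','z'] from rfl,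
    List.mem_cons, List.not_mem_nil, or_false, pv_char_eq_iff]
  rw [show ('a' : Char).toNat = 97 from rfl, show ('b' : Char).toNat = 98 from rfl, show ('c' : Char).toNat = 99 from rfl, show ('d' : Char).toNat = 100 from rfl, show ('e' : Char).toNat = 101 from rfl, show ('f' : Char).toNat = 102 from rfl, show ('g' : Char).toNat = 103 from rfl, show ('h' : Char).toNat = 104 from rfl, show ('i' : Char).toNat = 105 from rfl, show ('j' : Char).toNat = 106 from rfl, show ('k' : Char).toNat = 107 from rfl, show ('l' : Char).toNat = 108 from rfl, show ('m' : Char).toNat = 109 from rfl, show ('n' : Char).toNat = 110 from rfl, show ('o' : Char).toNat = 111 from rfl, show ('p' : Char).toNat = 112 from rfl, show ('q' : Char).toNat = 113 from rfl, show ('r' : Char).toNat = 114 from rfl, show ('s' : Char).toNat = 115 from rfl, show ('t' : Char).toNat = 116 from rfl, show ('u' : Char).toNat = 117 from rfl, show ('v' : Char).toNat = 118 from rfl, show ('w' : Char).toNat = 119 from rfl, show ('x' : Char).toNat = 120 from rfl, show ('y' : Char).toNat = 121 from rfl, show ('z' : Char).toNat = 122 from rfl]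
  omega

lemma pv_str_cons (c : Char) (t : List Char) :
    c.toString ++ String.ofList t = String.ofList (c :: t) := by
  rw [← String.toList_inj]; simp

-- joint characterisation of A's fold: part 1 from the flag-false state, part 2 from the
-- flag-true state whose open run is the last accumulator entry (j, s)
lemma pv_main (cs : List Char) :
    (∀ (i : Int) (acc : List (Int × String)),
      ((PySem.List.enumerate cs i).foldl pvStepA (acc, false)).1 = acc ++ pvScanRuns cs i)
    ∧ (∀ (i : Int) (acc : List (Int × String)) (j : Int) (s : String),
      ((PySem.List.enumerate cs i).foldl pvStepA (acc ++ [(j, s)], true)).1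
        = acc ++ (j, s ++ String.ofList (cs.takeWhile (fun d => !pvIsLower d))) ::
            pvScanRuns (cs.dropWhile (fun d => !pvIsLower d))
              (i + ((cs.takeWhile (fun d => !pvIsLower d)).length : Int))) := by
  induction cs with
  | nil =>
    constructor
    · intro i acc; simp [PySem.List.enumerate, pvScanRuns]
    · intro i acc j s; simp [PySem.List.enumerate, pvScanRuns]
  | cons c cs ih =>
    obtain ⟨ih1, ih2⟩ := ih
    constructor
    · intro i acc
      by_cases h : pvIsLower c = true
      · rw [PySem.List.enumerate_cons, List.foldl_cons,
          show pvStepA (acc, false) (i, c) = (acc, false) by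
            simp [pvStepA, pv_mem_lower, h]]
        rw [ih1, pvScanRuns, if_pos h]
      · rw [PySem.List.enumerate_cons, List.foldl_cons,
          show pvStepA (acc, false) (i, c) = (acc ++ [(i, c.toString)], true) by
            simp [pvStepA, pv_mem_lower, h]]
        rw [ih2, pvScanRuns, if_neg h, pv_str_cons]
    · intro i acc j s
      by_cases h : pvIsLower c = true
      · rw [PySem.List.enumerate_cons, List.foldl_cons,
          show pvStepA (acc ++ [(j, s)], true) (i, c) = (acc ++ [(j, s)], false) by
            simp [pvStepA, pv_mem_lower, h]]
        rw [ih1]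
        rw [show (c :: cs).takeWhile (fun d => !pvIsLower d) = [] by
              simp [List.takeWhile, h],
            show (c :: cs).dropWhile (fun d => !pvIsLower d) = c :: cs by
              simp [List.dropWhile, h]]
        rw [pvScanRuns, if_pos h]
        simp
      · rw [PySem.List.enumerate_cons, List.foldl_cons,
          show pvStepA (acc ++ [(j, s)], true) (i, c)
              = (acc ++ [(j, s ++ c.toString)], true) by
            simp [pvStepA, pv_mem_lower, h]]
        rw [ih2]
        rw [show (c :: cs).takeWhile (fun d => !pvIsLower d)
              = c :: cs.takeWhile (fun d => !pvIsLower d) by simp [List.takeWhile, h],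
            show (c :: cs).dropWhile (fun d => !pvIsLower d)
              = cs.dropWhile (fun d => !pvIsLower d) by simp [List.dropWhile, h]]
        rw [String.append_assoc, pv_str_cons]
        simp only [List.length_cons]
        push_cast
        ring_nf

-- ===== VERDICT (by name: the statement is the Claim_ definition above) =====
theorem extract_delimiters_spec : Claim_equal_extract_delimiters := by
  intro s _
  unfold Spec_extract_delimiters extract_delimiters extract_delimiters_alt
  rw [(pv_main s.toList).1 0 []]
  simp
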